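-- pv_equiv track=rewrite | github.com/mathieukh/speechrecognizer | libri.py | int_to_string
-- ===== SOURCE A (Python) =====
-- FIRST_INDEX = ord('A') - 1
--
-- def int_to_string(data):
--     da = []
--     for y in data:
--         if y == 0:
--             da.append(' ')
--         elif y == 27:
--             da.append('\'')
--         elif y == 28:
--             da.append('_')
--         else:
--             i = y + FIRST_INDEX
--             da.append(chr(i))
--     return da
-- ===== SOURCE B (Python) =====
-- FIRST_INDEX = ord('A') - 1
--
-- def int_to_string(data):
--     # Stage 1: map every integer uniformly through chr with the alphabet offset.
--     raw = ''.join(chr(y + FIRST_INDEX) for y in data)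
--     # Stage 2: rewrite the three sentinel characters in one translation pass.
--     fixed = raw.translate(str.maketrans("@[\\", " '_"))
--     return list(fixed)
-- ===== Notes on version B (the rewrite author's own statement) =====
-- stated objective: alternative
-- what changed: Replaces A's single accumulator loop with an if/elif branch cascade by two staged passes: first map every integer uniformly through chr(y+FIRST_INDEX) into one string, then rewrite the three sentinel characters '@' '[' '\' via str.translate, and finally split into a character list; Pre_ excludes inputs where chr raises ValueError and the surrogate code points (0xD800-0xDFFF), where A's lone-surrogate return value is not representable as a Lean String.
-- outside the precondition, e.g. on int_to_string([-100]): A raises ValueError, B raises ValueError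
import Mathlib
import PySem

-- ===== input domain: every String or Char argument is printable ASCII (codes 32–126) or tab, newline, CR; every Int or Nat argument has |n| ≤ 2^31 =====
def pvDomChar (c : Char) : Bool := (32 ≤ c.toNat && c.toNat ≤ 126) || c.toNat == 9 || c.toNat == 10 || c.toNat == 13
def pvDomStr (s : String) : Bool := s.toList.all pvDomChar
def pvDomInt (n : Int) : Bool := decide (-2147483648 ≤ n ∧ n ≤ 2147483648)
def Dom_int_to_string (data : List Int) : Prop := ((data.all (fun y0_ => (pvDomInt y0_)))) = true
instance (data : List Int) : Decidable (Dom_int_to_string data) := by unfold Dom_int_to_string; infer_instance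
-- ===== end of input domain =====

-- B replaces A's single accumulator loop with branch cascade by two staged passes:
-- map every integer uniformly through chr, then rewrite the three sentinel
-- characters '@' '[' '\' via a translation table; objective: alternative.


-- ===== PORT A =====
-- FIRST_INDEX = ord('A') - 1 = 64; chr(i) ported by hand as Char.ofNat (exact on the
-- non-surrogate code points admitted by Pre_int_to_string)
def pvFirstIndex : Int := 64

-- the body of A's for-loop, as a named step function
def pvStepA (da : List String) (y : Int) : List String :=
  if y = 0 then da ++ [" "]
  else if y = 27 then da ++ ["'"]
  else if y = 28 then da ++ ["_"]
  else
    let i := y + pvFirstIndex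
    da ++ [String.ofList [Char.ofNat i.toNat]]

def int_to_string (data : List Int) : List String :=
  data.foldl pvStepA []

-- ===== PORT B =====
-- str.maketrans("@[\\", " '_") + translate, ported as a per-character rewrite
def pvTrans (c : Char) : Char :=
  if c = '@' then ' ' else if c = '[' then '\'' else if c = '\\' then '_' else c

def int_to_string_alt (data : List Int) : List String :=
  let raw := data.map (fun y => Char.ofNat (y + pvFirstIndex).toNat)   -- ''.join(chr(y + FIRST_INDEX) ...)
  let fixed := raw.map pvTrans                                          -- raw.translate(...)
  fixed.map (fun c => String.ofList [c])                                -- list(fixed)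

-- ===== PRECONDITION & SPEC =====
-- Pre_ excludes inputs on which chr raises ValueError (y+64 outside range(0x110000))
-- and those mapping to surrogate code points 0xD800–0xDFFF, where A returns a
-- lone-surrogate string that is not a value of the Lean String type.
def Pre_int_to_string (data : List Int) : Prop :=
  ∀ y ∈ data, y = 0 ∨ y = 27 ∨ y = 28 ∨
    (0 ≤ y + 64 ∧ y + 64 < 55296) ∨ (57344 ≤ y + 64 ∧ y + 64 < 1114112)
instance (data : List Int) : Decidable (Pre_int_to_string data) := by unfold Pre_int_to_string; infer_instance

def pvWitness_int_to_string : List Int := [0, 27, 28, 1, 26]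

def Spec_int_to_string (data : List Int) (out : List String) : Prop := out = int_to_string_alt data
instance (data : List Int) (out : List String) : Decidable (Spec_int_to_string data out) := by unfold Spec_int_to_string; infer_instance

-- ===== CLAIM (what is proved, stated in full; the proofs are below) =====
def Claim_equal_int_to_string : Prop := ∀ (data : List Int), Dom_int_to_string data → Pre_int_to_string data → Spec_int_to_string data (int_to_string data)

-- ===== LEMMAS AND PROOFS =====
lemma pvStepA_append (da : List String) (y : Int) : pvStepA da y = da ++ pvStepA [] y := by
  unfold pvStepA; split_ifs <;> simp

lemma foldl_stepA_acc (l : List Int) (acc : List String) :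
    l.foldl pvStepA acc = acc ++ l.foldl pvStepA [] := by
  induction l generalizing acc with
  | nil => simp
  | cons y t ih =>
    simp only [List.foldl]
    rw [ih, ih (pvStepA [] y), pvStepA_append, List.append_assoc]

lemma toNat_ofNat_valid (n : Nat) (h : Nat.isValidChar n) : (Char.ofNat n).toNat = n := by
  simp [Char.ofNat, h, Char.ofNatAux]

-- one element of B's staged pipeline equals one iteration of A's loop body
lemma stepA_eq_alt (y : Int)
    (hy : y = 0 ∨ y = 27 ∨ y = 28 ∨
      (0 ≤ y + 64 ∧ y + 64 < 55296) ∨ (57344 ≤ y + 64 ∧ y + 64 < 1114112)) :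
    pvStepA [] y = [String.ofList [pvTrans (Char.ofNat (y + pvFirstIndex).toNat)]] := by
  unfold pvStepA
  by_cases h0 : y = 0
  · subst h0; rfl
  · by_cases h27 : y = 27
    · subst h27; rfl
    · by_cases h28 : y = 28
      · subst h28; rfl
      · simp only [h0, h27, h28, if_false]
        have hv : Nat.isValidChar (y + pvFirstIndex).toNat := by
          rcases hy with h | h | h | h | h
          · exact absurd h h0
          · exact absurd h h27
          · exact absurd h h28
          · exact Or.inl (by unfold pvFirstIndex; omega)
          · exact Or.inr ⟨by unfold pvFirstIndex; omega, by unfold pvFirstIndex; omega⟩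
        have ht : (Char.ofNat (y + pvFirstIndex).toNat).toNat = (y + pvFirstIndex).toNat :=
          toNat_ofNat_valid _ hv
        have key : ∀ (c : Char) (m : Nat), c.toNat = m → (y + pvFirstIndex).toNat ≠ m →
            Char.ofNat (y + pvFirstIndex).toNat ≠ c := by
          intro c m hcm hm hc
          exact hm (by rw [← ht, hc, hcm])
        have hnn : 0 ≤ y + 64 := by
          rcases hy with h | h | h | h | h
          · exact absurd h h0
          · exact absurd h h27
          · exact absurd h h28
          · exact h.1
          · omega
        have e64 : Char.ofNat (y + pvFirstIndex).toNat ≠ '@' :=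
          key '@' 64 rfl (by unfold pvFirstIndex; omega)
        have e91 : Char.ofNat (y + pvFirstIndex).toNat ≠ '[' :=
          key '[' 91 rfl (by unfold pvFirstIndex; omega)
        have e92 : Char.ofNat (y + pvFirstIndex).toNat ≠ '\\' :=
          key '\\' 92 rfl (by unfold pvFirstIndex; omega)
        simp [pvTrans, e64, e91, e92]

lemma foldl_eq_pipeline (l : List Int)
    (hl : ∀ y ∈ l, y = 0 ∨ y = 27 ∨ y = 28 ∨
      (0 ≤ y + 64 ∧ y + 64 < 55296) ∨ (57344 ≤ y + 64 ∧ y + 64 < 1114112)) :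
    l.foldl pvStepA [] =
      l.map (fun y => String.ofList [pvTrans (Char.ofNat (y + pvFirstIndex).toNat)]) := by
  induction l with
  | nil => rfl
  | cons y t ih =>
    simp only [List.foldl, List.map]
    rw [foldl_stepA_acc, ih (fun z hz => hl z (List.mem_cons_of_mem _ hz)),
        stepA_eq_alt y (hl y List.mem_cons_self)]
    rfl

-- ===== VERDICT (by name: the statement is the Claim_ definition above) =====
theorem int_to_string_spec : Claim_equal_int_to_string := by
  intro data _ hpre
  show int_to_string data = int_to_string_alt data
  unfold int_to_string int_to_string_alt
  rw [foldl_eq_pipeline data hpre]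
  simp [List.map_map]
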